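-- pv_equiv track=rewrite | github.com/pobed2/SupermileageBench | supermileagebench/DynoMath.py | _findIndexOfPointInTime
-- ===== SOURCE A (Python) =====
-- def _findIndexOfPointInTime(time, epsilon):
--     currentTime = time[-1]
--     index = len(time)-1
--
--     for timeBefore in reversed(time):
--         if(currentTime - timeBefore >= epsilon):
--             return index
--         index-=1
--     return 0
-- ===== SOURCE B (Python) =====
-- def _findIndexOfPointInTime(time, epsilon):
--     last = time[-1]
--     best = 0
--     for i, t in enumerate(time):
--         if last - t >= epsilon:
--             best = i
--     return best
-- ===== Notes on version B (the rewrite author's own statement) =====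
-- stated objective: alternative
-- what changed: B replaces A's backward scan with early return by a single forward pass that keeps the last matching index in an accumulator (the largest index from the end in A equals the last match going forward).
import Mathlib
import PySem

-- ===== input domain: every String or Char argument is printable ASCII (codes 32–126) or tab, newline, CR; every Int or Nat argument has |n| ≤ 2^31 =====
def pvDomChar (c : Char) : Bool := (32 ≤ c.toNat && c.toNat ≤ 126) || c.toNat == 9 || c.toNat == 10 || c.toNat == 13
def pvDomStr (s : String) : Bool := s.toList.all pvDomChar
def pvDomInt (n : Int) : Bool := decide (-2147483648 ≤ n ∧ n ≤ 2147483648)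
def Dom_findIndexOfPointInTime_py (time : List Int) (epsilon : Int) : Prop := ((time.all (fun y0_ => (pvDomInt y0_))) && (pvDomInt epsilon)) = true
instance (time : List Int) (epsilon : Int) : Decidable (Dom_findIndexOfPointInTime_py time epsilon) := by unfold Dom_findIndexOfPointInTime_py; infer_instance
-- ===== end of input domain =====

-- B replaces A's backward scan with early return by a single forward pass keeping the
-- last matching index in an accumulator (objective: alternative, same O(n) cost).

-- ===== PORT A =====
-- A's loop: 'for timeBefore in reversed(time)' with 'index' counting down; early return on match.
def pvALoop (ct eps : Int) : List Int → Int → Int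
  | [], _ => 0
  | t :: rest, idx => if ct - t ≥ eps then idx else pvALoop ct eps rest (idx - 1)

def findIndexOfPointInTime_py (time : List Int) (epsilon : Int) : Int :=
  match PySem.List.pyGet? time (-1) with
  | none => 0  -- Python: IndexError on empty 'time' (excluded by Pre_)
  | some currentTime => pvALoop currentTime epsilon time.reverse ((time.length : Int) - 1)

-- ===== PORT B =====
def findIndexOfPointInTime_py_alt (time : List Int) (epsilon : Int) : Int :=
  match PySem.List.pyGet? time (-1) with
  | none => 0  -- Python: IndexError on empty 'time' (excluded by Pre_)
  | some last =>
      (PySem.List.enumerate time).foldl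
        (fun best p => if last - p.2 ≥ epsilon then p.1 else best) 0

-- ===== PRECONDITION & SPEC =====
-- Pre_ excludes exactly the empty list, on which both Pythons raise IndexError at time[-1].
def Pre_findIndexOfPointInTime_py (time : List Int) (epsilon : Int) : Prop := time ≠ []
instance (time : List Int) (epsilon : Int) : Decidable (Pre_findIndexOfPointInTime_py time epsilon) := by
  unfold Pre_findIndexOfPointInTime_py; infer_instance
def pvWitness_findIndexOfPointInTime_py : List Int × Int := ([0, 3, 7], 4)

def Spec_findIndexOfPointInTime_py (time : List Int) (epsilon : Int) (out : Int) : Prop := out = findIndexOfPointInTime_py_alt time epsilon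
instance (time : List Int) (epsilon : Int) (out : Int) : Decidable (Spec_findIndexOfPointInTime_py time epsilon out) := by unfold Spec_findIndexOfPointInTime_py; infer_instance

-- ===== CLAIM (what is proved, stated in full; the proofs are below) =====
def Claim_equal_findIndexOfPointInTime_py : Prop := ∀ (time : List Int) (epsilon : Int), Dom_findIndexOfPointInTime_py time epsilon → Pre_findIndexOfPointInTime_py time epsilon → Spec_findIndexOfPointInTime_py time epsilon (findIndexOfPointInTime_py time epsilon)

-- ===== LEMMAS AND PROOFS =====

-- A's backward loop generalized with an arbitrary default value (returned when nothing matches).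
def pvALoopD (ct eps : Int) : List Int → Int → Int → Int
  | [], _, a => a
  | t :: rest, idx, a => if ct - t ≥ eps then idx else pvALoopD ct eps rest (idx - 1) a

lemma pvALoopD_zero (ct eps : Int) : ∀ (l : List Int) (i : Int),
    pvALoopD ct eps l i 0 = pvALoop ct eps l i := by
  intro l
  induction l with
  | nil => intro i; rfl
  | cons t rest ih =>
      intro i
      simp only [pvALoopD, pvALoop]
      split_ifs <;> simp [ih]

-- Key: B's forward last-match fold with accumulator a equals A's backward first-match
-- scan with default a, for every start index s.
lemma pv_fold_eq_backward (ct eps : Int) : ∀ (xs : List Int) (s a : Int),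
    (PySem.List.enumerate xs s).foldl (fun best p => if ct - p.2 ≥ eps then p.1 else best) a
      = pvALoopD ct eps xs.reverse (s + (xs.length : Int) - 1) a := by
  intro xs
  induction xs using List.reverseRecOn with
  | nil => intro s a; simp [PySem.List.enumerate_nil, pvALoopD]
  | append_singleton ys t ih =>
      intro s a
      rw [PySem.List.enumerate_append, List.foldl_append]
      simp only [PySem.List.enumerate_cons, PySem.List.enumerate_nil, List.foldl_cons,
        List.foldl_nil, List.reverse_append, List.reverse_cons, List.reverse_nil,
        List.nil_append, List.cons_append, List.length_append, List.length_cons,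
        List.length_nil, pvALoopD]
      push_cast
      rw [ih s a]
      have h1 : s + ((ys.length : Int) + 1) - 1 = s + (ys.length : Int) := by ring
      simp only [h1]

-- ===== VERDICT (by name: the statement is the Claim_ definition above) =====
theorem findIndexOfPointInTime_py_spec : Claim_equal_findIndexOfPointInTime_py := by
  intro time epsilon _ _
  unfold Spec_findIndexOfPointInTime_py findIndexOfPointInTime_py findIndexOfPointInTime_py_alt
  cases h : PySem.List.pyGet? time (-1) with
  | none => rfl
  | some ct =>
      simp only []
      rw [pv_fold_eq_backward ct epsilon time 0 0, pvALoopD_zero]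
      norm_num
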